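-- pv_equiv track=rewrite | github.com/BBT-AlgorithmsWorkGroup/FirstChallange | que1/cpt/kelimeleriyaristir.py | karsilastir
-- ===== SOURCE A (Python) =====
-- harfler=['a', 'b', 'c', 'd', 'e', 'f', 'g', 'h', 'i', 'j', 'k', 'l', 'm', 'n', 'o', 'p', 'q', 'r', 's', 't', 'u', 'v', 'w', 'x', 'y', 'z']
--
-- def karsilastir(veri):
--     v=veri.split(" ")
--     v2=[]
--     for veri1 in v:
--         t=0
--         for a in (veri1) :
--             t=t+int(harfler.index(a)+1)
--         v2.append(t)
--     return (v[v2.index(max(v2))])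
-- ===== SOURCE B (Python) =====
-- harfler=['a', 'b', 'c', 'd', 'e', 'f', 'g', 'h', 'i', 'j', 'k', 'l', 'm', 'n', 'o', 'p', 'q', 'r', 's', 't', 'u', 'v', 'w', 'x', 'y', 'z']
--
-- def karsilastir(veri):
--     best = None
--     for w in veri.split(" "):
--         s = sum(harfler.index(ch) + 1 for ch in w)
--         if best is None or s > best[1]:
--             best = (w, s)
--     return best[0]
-- ===== Notes on version B (the rewrite author's own statement) =====
-- stated objective: simpler
-- what changed: Replaces A's two-phase scheme (build the full score list, then v2.index(max(v2)) plus a positional lookup) by a single pass that keeps only a running (best_word, best_score) pair updated on strictly greater scores, so the score list and both index scans disappear.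
import Mathlib
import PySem

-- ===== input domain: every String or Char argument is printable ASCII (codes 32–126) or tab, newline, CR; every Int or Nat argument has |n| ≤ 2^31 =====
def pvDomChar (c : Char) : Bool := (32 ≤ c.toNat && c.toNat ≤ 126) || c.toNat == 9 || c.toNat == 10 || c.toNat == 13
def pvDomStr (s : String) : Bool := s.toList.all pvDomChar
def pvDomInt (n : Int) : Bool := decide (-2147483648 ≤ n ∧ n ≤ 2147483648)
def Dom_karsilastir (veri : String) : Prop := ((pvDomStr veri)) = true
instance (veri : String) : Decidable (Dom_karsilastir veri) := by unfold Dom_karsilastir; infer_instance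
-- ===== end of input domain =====

-- B replaces A's score-list + index(max) two-phase argmax by a single running-best pass (objective: simpler).

-- ===== PORT A =====
def pvHarfler : List Char := ['a', 'b', 'c', 'd', 'e', 'f', 'g', 'h', 'i', 'j', 'k', 'l', 'm', 'n', 'o', 'p', 'q', 'r', 's', 't', 'u', 'v', 'w', 'x', 'y', 'z']

-- harfler.index(a) raises ValueError off the alphabet; Pre_ excludes those inputs,
-- so the .getD 0 default is never reached on admitted inputs.
def pvScoreA (w : List Char) : Int :=
  w.foldl (fun t a => t + (((PySem.List.index? pvHarfler a).getD 0 : Int) + 1)) 0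

def pvKarsA (v : List (List Char)) : String :=
  let v2 := v.foldl (fun acc w => acc ++ [pvScoreA w]) []
  match PySem.List.max? v2 (fun y => y) with
  | none => ""          -- unreachable: split(" ") never yields an empty list
  | some m =>
    match PySem.List.index? v2 m with
    | none => ""        -- unreachable: m is an element of v2
    | some i => String.ofList ((PySem.List.pyGet? v (i : Int)).getD [])

def karsilastir (veri : String) : String :=
  pvKarsA (PySem.Chars.splitOn veri.toList [' '])

-- ===== PORT B =====
def pvScoreB (w : List Char) : Int :=
  (w.map (fun ch => ((PySem.List.index? pvHarfler ch).getD 0 : Int) + 1)).sum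

def pvStepB (best : Option (List Char × Int)) (w : List Char) : Option (List Char × Int) :=
  let s := pvScoreB w
  match best with
  | none => some (w, s)
  | some (bw, bs) => if bs < s then some (w, s) else some (bw, bs)

def karsilastir_alt (veri : String) : String :=
  match (PySem.Chars.splitOn veri.toList [' ']).foldl pvStepB none with
  | some (bw, _) => String.ofList bw
  | none => ""

-- ===== PRECONDITION & SPEC =====
-- A raises ValueError on any character outside 'a'..'z' (other than the ' ' separator);
-- Pre_ admits exactly the strings made of lowercase letters and spaces.
def Pre_karsilastir (veri : String) : Prop :=
  (veri.toList.all (fun c => c == ' ' || ('a' ≤ c && c ≤ 'z'))) = true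
instance (veri : String) : Decidable (Pre_karsilastir veri) := by unfold Pre_karsilastir; infer_instance
def pvWitness_karsilastir : String := "ab zz a"

def Spec_karsilastir (veri : String) (out : String) : Prop := out = karsilastir_alt veri
instance (veri : String) (out : String) : Decidable (Spec_karsilastir veri out) := by unfold Spec_karsilastir; infer_instance

-- ===== CLAIM (what is proved, stated in full; the proofs are below) =====
def Claim_equal_karsilastir : Prop := ∀ (veri : String), Dom_karsilastir veri → Pre_karsilastir veri → Spec_karsilastir veri (karsilastir veri)

-- ===== LEMMAS AND PROOFS =====

-- running max over the scores of t, started at s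
def pvMsc (s : Int) (t : List (List Char)) : Int := (t.map pvScoreB).foldl max s

-- first word attaining the maximal score
def pvFm : List (List Char) → List Char
  | [] => []
  | [w] => w
  | w :: u :: r => if pvMsc (pvScoreB u) r ≤ pvScoreB w then w else pvFm (u :: r)

lemma pvScoreA_eq (w : List Char) : pvScoreA w = pvScoreB w := by
  unfold pvScoreA pvScoreB
  rw [PySem.List.foldl_add]
  simp

lemma pvFoldlMax_cons (s a : Int) (l : List Int) :
    (a :: l).foldl max s = max s (l.foldl max a) := by
  induction l generalizing s a with
  | nil => simp
  | cons b l ih =>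
      simp only [List.foldl_cons] at *
      rw [max_assoc, ih]

lemma pvLe_foldlMax (s : Int) (l : List Int) : s ≤ l.foldl max s := by
  induction l generalizing s with
  | nil => simp
  | cons a l ih => exact le_trans (le_max_left s a) (by simpa using ih (max s a))

lemma pvFoldlMax_mem (s : Int) (l : List Int) : l.foldl max s ∈ s :: l := by
  induction l generalizing s with
  | nil => simp
  | cons a l ih =>
      have h2 := ih (max s a)
      simp only [List.foldl_cons, List.mem_cons] at h2 ⊢
      rcases max_choice s a with h | h <;> rw [h] at h2 ⊢ <;> tauto

lemma pvV2_map (v : List (List Char)) (acc : List Int) :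
    v.foldl (fun acc w => acc ++ [pvScoreA w]) acc = acc ++ v.map pvScoreB := by
  induction v generalizing acc with
  | nil => simp
  | cons w v ih =>
      rw [List.foldl_cons, ih]
      simp [pvScoreA_eq]

lemma pvKarsA_cons (w : List Char) (t : List (List Char)) :
    pvKarsA (w :: t) =
      (match PySem.List.index? (pvScoreB w :: t.map pvScoreB) (pvMsc (pvScoreB w) t) with
       | none => ""
       | some i => String.ofList ((PySem.List.pyGet? (w :: t) (i : Int)).getD [])) := by
  unfold pvKarsA
  rw [pvV2_map]
  simp only [List.nil_append, List.map_cons, PySem.List.max?_id_cons]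
  rfl

-- A's body computes the first maximal word
lemma pvA_eq_fm : ∀ (t : List (List Char)) (w : List Char),
    pvKarsA (w :: t) = String.ofList (pvFm (w :: t)) := by
  intro t
  induction t with
  | nil =>
      intro w
      rw [pvKarsA_cons]
      simp only [pvMsc, List.map_nil, List.foldl_nil, PySem.List.index?_cons_self]
      rw [PySem.List.pyGet?_natCast]
      simp [pvFm]
  | cons u r ih =>
      intro w
      rw [pvKarsA_cons]
      have hc := pvFoldlMax_cons (pvScoreB w) (pvScoreB u) (r.map pvScoreB)
      by_cases h2 : pvMsc (pvScoreB u) r ≤ pvScoreB w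
      · have hm : pvMsc (pvScoreB w) (u :: r) = pvScoreB w := by
          simp only [pvMsc, List.map_cons]
          rw [hc]
          exact max_eq_left h2
        have hfm : pvFm (w :: u :: r) = w := by
          show (if pvMsc (pvScoreB u) r ≤ pvScoreB w then w else pvFm (u :: r)) = w
          rw [if_pos h2]
        rw [hm, hfm, PySem.List.index?_cons_self]
        simp
      · have hle : pvScoreB u ≤ pvMsc (pvScoreB u) r := pvLe_foldlMax _ _
        have hm : pvMsc (pvScoreB w) (u :: r) = pvMsc (pvScoreB u) r := by
          simp only [pvMsc, List.map_cons]
          rw [hc]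
          exact max_eq_right (le_of_lt (by simpa [pvMsc] using lt_of_not_ge h2))
        have hne : pvScoreB w ≠ pvMsc (pvScoreB u) r := by omega
        have hmem : pvMsc (pvScoreB u) r ∈ pvScoreB u :: r.map pvScoreB := by
          simpa [pvMsc] using pvFoldlMax_mem (pvScoreB u) (r.map pvScoreB)
        obtain ⟨i, hi⟩ : ∃ i,
            PySem.List.index? (pvScoreB u :: r.map pvScoreB) (pvMsc (pvScoreB u) r) = some i := by
          exact Option.isSome_iff_exists.mp ((PySem.List.index?_isSome_iff _ _).mpr hmem)
        have hfm : pvFm (w :: u :: r) = pvFm (u :: r) := by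
          show (if pvMsc (pvScoreB u) r ≤ pvScoreB w then w else pvFm (u :: r)) = pvFm (u :: r)
          rw [if_neg h2]
        have ihr := ih u
        rw [pvKarsA_cons] at ihr
        simp only [hi] at ihr
        rw [hm, PySem.List.index?_cons_of_ne _ hne]
        simp only [List.map_cons, hi, Option.map_some]
        rw [hfm, ← ihr]
        have g1 : PySem.List.pyGet? (w :: u :: r) ((i + 1 : Nat) : Int) = (u :: r)[i]? := by
          rw [PySem.List.pyGet?_natCast]
          simp
        have g2 : PySem.List.pyGet? (u :: r) ((i : Nat) : Int) = (u :: r)[i]? :=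
          PySem.List.pyGet?_natCast _ _
        rw [g1, g2]

lemma pvFm_drop (w u : List Char) (r : List (List Char)) (h : pvScoreB u ≤ pvScoreB w) :
    pvFm (w :: u :: r) = pvFm (w :: r) := by
  cases r with
  | nil =>
      show (if pvMsc (pvScoreB u) [] ≤ pvScoreB w then w else pvFm [u]) = w
      rw [if_pos (by simpa [pvMsc] using h)]
  | cons x r' =>
      have hs : pvMsc (pvScoreB u) (x :: r') = max (pvScoreB u) (pvMsc (pvScoreB x) r') := by
        simp only [pvMsc, List.map_cons]
        exact pvFoldlMax_cons _ _ _
      by_cases h2 : pvMsc (pvScoreB x) r' ≤ pvScoreB w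
      · show (if pvMsc (pvScoreB u) (x :: r') ≤ pvScoreB w then w else pvFm (u :: x :: r')) =
            (if pvMsc (pvScoreB x) r' ≤ pvScoreB w then w else pvFm (x :: r'))
        rw [if_pos h2, if_pos (by rw [hs]; exact max_le h h2)]
      · show (if pvMsc (pvScoreB u) (x :: r') ≤ pvScoreB w then w else pvFm (u :: x :: r')) =
            (if pvMsc (pvScoreB x) r' ≤ pvScoreB w then w else pvFm (x :: r'))
        rw [if_neg h2, if_neg (by rw [hs]; omega),
          show pvFm (u :: x :: r') =
            (if pvMsc (pvScoreB x) r' ≤ pvScoreB u then u else pvFm (x :: r')) from rfl,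
          if_neg (by omega)]

-- B's fold computes the same first maximal word together with the running max
lemma pvB_fold (t : List (List Char)) (w : List Char) :
    t.foldl pvStepB (some (w, pvScoreB w)) = some (pvFm (w :: t), pvMsc (pvScoreB w) t) := by
  induction t generalizing w with
  | nil => simp [pvFm, pvMsc]
  | cons u r ih =>
      rw [List.foldl_cons]
      show List.foldl pvStepB
          (if pvScoreB w < pvScoreB u then some (u, pvScoreB u) else some (w, pvScoreB w)) r = _
      by_cases h : pvScoreB w < pvScoreB u
      · rw [if_pos h, ih u]
        have h1 : pvMsc (pvScoreB w) (u :: r) = pvMsc (pvScoreB u) r := by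
          simp only [pvMsc, List.map_cons, List.foldl_cons, max_eq_right h.le]
        have h2 : pvFm (w :: u :: r) = pvFm (u :: r) := by
          have hle := pvLe_foldlMax (pvScoreB u) (r.map pvScoreB)
          show (if pvMsc (pvScoreB u) r ≤ pvScoreB w then w else pvFm (u :: r)) = pvFm (u :: r)
          have hn : ¬ pvMsc (pvScoreB u) r ≤ pvScoreB w := by simp only [pvMsc]; omega
          rw [if_neg hn]
        rw [h1, h2]
      · rw [if_neg h, ih w]
        have h1 : pvMsc (pvScoreB w) (u :: r) = pvMsc (pvScoreB w) r := by
          simp only [pvMsc, List.map_cons, List.foldl_cons,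
            max_eq_left (by omega : pvScoreB u ≤ pvScoreB w)]
        rw [h1, pvFm_drop w u r (by omega)]

lemma pvMain (v : List (List Char)) : pvKarsA v = (match v.foldl pvStepB none with
    | some (bw, _) => String.ofList bw
    | none => "") := by
  cases v with
  | nil => simp [pvKarsA, PySem.List.max?]
  | cons w t =>
      have h1 := pvA_eq_fm t w
      have h2 := pvB_fold t w
      rw [List.foldl_cons, show pvStepB none w = some (w, pvScoreB w) from rfl, h2, h1]

-- ===== VERDICT (by name: the statement is the Claim_ definition above) =====
theorem karsilastir_spec : Claim_equal_karsilastir := by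
  intro veri _ _
  unfold Spec_karsilastir karsilastir karsilastir_alt
  exact pvMain _
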